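-- pv_equiv track=rewrite | github.com/patr1c1a/plataforma-practica-interactiva | web/app/services/exercise_catalog.py | _order_exercises_by_category
-- ===== SOURCE A (Python) =====
-- ORDERED_CATEGORIES = [
--     "numeros",
--     "strings",
--     "listas",
--     "diccionarios",
-- ]
--
-- def _order_exercises_by_category(
--     exercises: dict[str, list[str]],
-- ) -> dict[str, list[str]]:
--     ordered_exercises: dict[str, list[str]] = {}
--
--     ordered_keys = [key for key in ORDERED_CATEGORIES if key in exercises]
--     remaining_keys = sorted(key for key in exercises if key not in ORDERED_CATEGORIES)
--
--     for key in ordered_keys + remaining_keys: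
--         ordered_exercises[key] = exercises[key]
--
--     return ordered_exercises
-- ===== SOURCE B (Python) =====
-- ORDERED_CATEGORIES = [
--     "numeros",
--     "strings",
--     "listas",
--     "diccionarios",
-- ]
--
-- def _order_exercises_by_category(
--     exercises: dict[str, list[str]],
-- ) -> dict[str, list[str]]:
--     n = len(ORDERED_CATEGORIES)
--     ordered = sorted(
--         exercises,
--         key=lambda k: (ORDERED_CATEGORIES.index(k) if k in ORDERED_CATEGORIES else n, k),
--     )
--     return {k: exercises[k] for k in ordered}
-- ===== Notes on version B (the rewrite author's own statement) =====
-- stated objective: simpler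
-- what changed: Replaces A's two-phase construction (filter the fixed category list against the dict, separately sort the remaining keys, concatenate) by a single sort of all keys under a composite (category-rank, name) key.
import Mathlib
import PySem

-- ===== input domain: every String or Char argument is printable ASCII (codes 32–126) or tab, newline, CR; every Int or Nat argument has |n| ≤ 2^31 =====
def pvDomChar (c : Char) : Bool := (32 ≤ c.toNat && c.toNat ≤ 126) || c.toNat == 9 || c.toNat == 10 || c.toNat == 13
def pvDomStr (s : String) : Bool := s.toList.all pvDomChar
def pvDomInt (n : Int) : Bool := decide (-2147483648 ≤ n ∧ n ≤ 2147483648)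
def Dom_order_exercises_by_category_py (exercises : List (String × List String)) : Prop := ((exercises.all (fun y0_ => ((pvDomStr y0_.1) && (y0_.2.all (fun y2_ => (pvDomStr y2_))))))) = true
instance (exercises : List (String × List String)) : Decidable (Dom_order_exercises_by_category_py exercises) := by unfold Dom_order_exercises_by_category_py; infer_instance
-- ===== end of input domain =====

-- B replaces A's filter-known-categories-then-sort-the-rest-and-concatenate by a single
-- composite-key sort (category rank, then name) over all keys: simpler decomposition, same cost.


-- ===== PORT A =====
def pvOC : List String := ["numeros", "strings", "listas", "diccionarios"]

def order_exercises_by_category_py (exercises : List (String × List String)) : List (String × List String) :=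
  let ordered_keys := pvOC.filter (fun key => (exercises.map Prod.fst).contains key)
  let remaining_keys :=
    PySem.List.sorted ((exercises.map Prod.fst).filter (fun key => !pvOC.contains key)) (fun k => k)
  ((ordered_keys ++ remaining_keys).foldl
      (fun acc key => acc.insert key ((PySem.Dict.mk exercises).getD key []))
      PySem.Dict.empty).items

-- ===== PORT B =====
-- ORDERED_CATEGORIES.index(k) if k in ORDERED_CATEGORIES else len(ORDERED_CATEGORIES)
def pvRank (k : String) : Nat :=
  if pvOC.contains k then (PySem.List.index? pvOC k).getD 0 else pvOC.length

def order_exercises_by_category_py_alt (exercises : List (String × List String)) : List (String × List String) :=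
  let ordered := PySem.List.sorted2 (exercises.map Prod.fst) pvRank (fun k => k)
  (ordered.foldl
      (fun acc key => acc.insert key ((PySem.Dict.mk exercises).getD key []))
      PySem.Dict.empty).items

-- ===== PRECONDITION & SPEC =====
-- The argument encodes a Python dict, whose keys are necessarily distinct; association lists with
-- duplicate keys correspond to no Python input, so Pre_ requires the keys to be pairwise distinct.
def Pre_order_exercises_by_category_py (exercises : List (String × List String)) : Prop :=
  (exercises.map Prod.fst).Nodup
instance (exercises : List (String × List String)) : Decidable (Pre_order_exercises_by_category_py exercises) := by unfold Pre_order_exercises_by_category_py; infer_instance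

def pvWitness_order_exercises_by_category_py : (List (String × List String)) :=
  [("strings", ["ej1"]), ("abc", []), ("numeros", ["ej2"])]

def Spec_order_exercises_by_category_py (exercises : List (String × List String)) (out : List (String × List String)) : Prop := out = order_exercises_by_category_py_alt exercises
instance (exercises : List (String × List String)) (out : List (String × List String)) : Decidable (Spec_order_exercises_by_category_py exercises out) := by unfold Spec_order_exercises_by_category_py; infer_instance

-- ===== CLAIM (what is proved, stated in full; the proofs are below) =====
def Claim_equal_order_exercises_by_category_py : Prop := ∀ (exercises : List (String × List String)), Dom_order_exercises_by_category_py exercises → Pre_order_exercises_by_category_py exercises → Spec_order_exercises_by_category_py exercises (order_exercises_by_category_py exercises)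

-- ===== LEMMAS AND PROOFS =====

-- the composite key of B, as one lexicographic key
def pvLexKey (k : String) : ℕ ×ₗ String := toLex (pvRank k, k)

-- sorted2 with two keys is sorted with the lexicographic key
theorem pv_sorted2_eq_sorted_lex (xs : List String) :
    PySem.List.sorted2 xs pvRank (fun k => k) = PySem.List.sorted xs pvLexKey := by
  have hb : (fun a b : String => decide (pvRank a < pvRank b) || (!decide (pvRank b < pvRank a) && decide (a < b)))
      = fun a b : String => decide (pvLexKey a < pvLexKey b) := by
    funext a b
    rcases lt_trichotomy (pvRank a) (pvRank b) with h | h | h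
    · simp [pvLexKey, Prod.Lex.lt_iff, h]
    · simp [pvLexKey, Prod.Lex.lt_iff, h]
    · simp only [pvLexKey, Prod.Lex.lt_iff, ofLex_toLex]
      simp [h.asymm, h.ne']
      intro hh
      exact absurd h (Nat.not_lt.mpr hh)
  simp only [PySem.List.sorted2, PySem.List.sorted, if_neg (Bool.false_ne_true)]
  rw [hb]

theorem pv_sorted_lex_eq (exercises : List (String × List String))
    (hnd : (exercises.map Prod.fst).Nodup) :
    PySem.List.sorted (exercises.map Prod.fst) pvLexKey =
      pvOC.filter (fun key => (exercises.map Prod.fst).contains key) ++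
        PySem.List.sorted ((exercises.map Prod.fst).filter (fun key => !pvOC.contains key)) (fun k => k) := by
  have hrank4 : ∀ k : String, k ∉ pvOC → pvRank k = 4 := by
    intro k hk
    simp only [pvRank]
    rw [if_neg (by simpa [List.contains_iff_mem] using hk)]
    rfl
  apply PySem.List.sorted_eq_of_perm_of_pairwise_lt
  · -- the right-hand side is a permutation of the key list
    have h1 : (pvOC.filter (fun key => (exercises.map Prod.fst).contains key)).Perm
        ((exercises.map Prod.fst).filter (fun k => pvOC.contains k)) := by
      rw [List.perm_ext_iff_of_nodup ((by decide : pvOC.Nodup).filter _) (hnd.filter _)]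
      intro a
      simp only [List.mem_filter, List.contains_iff_mem]
      exact and_comm
    have h2 : (PySem.List.sorted ((exercises.map Prod.fst).filter (fun key => !pvOC.contains key)) (fun k => k)).Perm
        ((exercises.map Prod.fst).filter (fun k => !pvOC.contains k)) :=
      PySem.List.sorted_perm _ _ _
    exact (h1.append h2).trans (List.filter_append_perm _ _)
  · -- and it is strictly increasing under the lexicographic key
    rw [List.pairwise_append]
    refine ⟨?_, ?_, ?_⟩
    · have hOC : pvOC.Pairwise (fun a b => pvRank a < pvRank b) := by decide
      exact List.Pairwise.sublist List.filter_sublist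
        (hOC.imp fun h => Prod.Lex.lt_iff.mpr (Or.inl h))
    · have hperm := PySem.List.sorted_perm ((exercises.map Prod.fst).filter (fun key => !pvOC.contains key)) (fun k : String => k) false
      have hnds : (PySem.List.sorted ((exercises.map Prod.fst).filter (fun key => !pvOC.contains key)) (fun k : String => k)).Nodup :=
        hperm.symm.nodup (hnd.filter _)
      have hle : (PySem.List.sorted ((exercises.map Prod.fst).filter (fun key => !pvOC.contains key)) (fun k : String => k)).Pairwise
          (fun a b => a ≤ b) := PySem.List.sorted_pairwise _ _
      refine (hle.and hnds).imp_of_mem ?_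
      intro a b ha hb hab
      have hb4 : pvRank b = 4 := by
        have := ((PySem.List.mem_sorted _ _ _ _).mp hb)
        have hbnot : b ∉ pvOC := by
          rcases List.mem_filter.mp this with ⟨-, h⟩
          simpa [List.contains_iff_mem] using h
        exact hrank4 b hbnot
      have ha4 : pvRank a = 4 := by
        have := ((PySem.List.mem_sorted _ _ _ _).mp ha)
        have hanot : a ∉ pvOC := by
          rcases List.mem_filter.mp this with ⟨-, h⟩
          simpa [List.contains_iff_mem] using h
        exact hrank4 a hanot
      refine Prod.Lex.lt_iff.mpr (Or.inr ?_)
      simp only [pvLexKey, ofLex_toLex]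
      exact ⟨by rw [ha4, hb4], lt_of_le_of_ne hab.1 hab.2⟩
    · intro a ha b hb
      have haOC : a ∈ pvOC := (List.mem_filter.mp ha).1
      have hb4 : pvRank b = 4 := by
        have := (PySem.List.mem_sorted _ _ _ _).mp hb
        have : b ∉ pvOC := by
          rcases List.mem_filter.mp this with ⟨-, h⟩
          simpa [List.contains_iff_mem] using h
        exact hrank4 b this
      have haR : pvRank a < 4 := by
        simp only [pvOC, List.mem_cons, List.not_mem_nil, or_false] at haOC
        rcases haOC with rfl | rfl | rfl | rfl <;> decide
      refine Prod.Lex.lt_iff.mpr (Or.inl ?_)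
      simp only [pvLexKey, ofLex_toLex]
      rw [hb4]; exact haR

-- ===== VERDICT (by name: the statement is the Claim_ definition above) =====
theorem order_exercises_by_category_py_spec : Claim_equal_order_exercises_by_category_py := by
  intro exercises _ hpre
  unfold Spec_order_exercises_by_category_py
  unfold order_exercises_by_category_py order_exercises_by_category_py_alt
  rw [pv_sorted2_eq_sorted_lex, pv_sorted_lex_eq exercises hpre]
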